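-- pv_equiv track=rewrite | github.com/mjgomsa/comp431 | HW3/parser.py | getEndNS
-- ===== SOURCE A (Python) =====
-- def getEndNS(st):
--     for char in st:
--         if (char == '<'):
--             return st.index(char)
--         elif ((parseNull(char) == True) or (parseSpace(char) == 0)):
--             continue
--         else:
--             return -6
--
-- def parseSpace(char):
--     if (char == ' ' or char == '\t'):
--         return 0
--     else:
--         return 3
--
-- def parseNull(char):
--     if (char == ''):
--         return True
--     else:
--         return False
-- ===== SOURCE B (Python) =====
-- def getEndNS(st):
--     stripped = st.lstrip(' \t')
--     if stripped == '':
--         return None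
--     if stripped[0] == '<':
--         return len(st) - len(stripped)
--     return -6
-- ===== Notes on version B (the rewrite author's own statement) =====
-- stated objective: simpler
-- what changed: Replaces the explicit per-character loop with helper predicates and a redundant st.index re-scan by a single library left-strip of spaces and tabs plus length arithmetic on the stripped remainder.
import Mathlib
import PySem

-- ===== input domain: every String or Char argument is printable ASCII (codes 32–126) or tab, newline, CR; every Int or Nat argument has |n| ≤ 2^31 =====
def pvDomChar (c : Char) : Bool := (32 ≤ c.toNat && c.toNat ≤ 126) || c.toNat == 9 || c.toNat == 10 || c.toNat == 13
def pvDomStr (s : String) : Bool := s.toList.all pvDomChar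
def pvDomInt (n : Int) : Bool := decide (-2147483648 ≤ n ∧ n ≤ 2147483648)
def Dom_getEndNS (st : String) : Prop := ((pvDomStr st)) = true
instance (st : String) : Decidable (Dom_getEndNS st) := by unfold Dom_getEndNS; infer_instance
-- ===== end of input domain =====

-- B replaces A's explicit per-character scan (with helper predicates and an st.index re-scan)
-- by a library left-strip of spaces/tabs plus length arithmetic; objective: simpler.

-- ===== PORT A =====
def parseSpace (c : Char) : Int := if c = ' ' ∨ c = '\t' then 0 else 3

-- Python's parseNull compares a one-character string with '' — always False while iterating a string.
def parseNull (_c : Char) : Bool := false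

def getEndNSAux (st : String) : List Char → Option Int
  | [] => none   -- loop falls through: Python returns None
  | c :: rest =>
    if c = '<' then some (PySem.Str.find st (String.ofList [c]))  -- st.index(char); c occurs in st here, so find = index
    else if parseNull c = true ∨ parseSpace c = 0 then getEndNSAux st rest
    else some (-6)

def getEndNS (st : String) : Option Int := getEndNSAux st st.toList

-- ===== PORT B =====
-- the Python lstrip of spaces/tabs is ported exactly as dropWhile over the characters.
def getEndNS_alt (st : String) : Option Int :=
  let stripped := st.toList.dropWhile (fun c => c == ' ' || c == '\t')
  if stripped = [] then none
  else if stripped.head? = some '<' then some ((st.toList.length : Int) - stripped.length)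
  else some (-6)

-- ===== PRECONDITION & SPEC =====
def Spec_getEndNS (st : String) (out : Option Int) : Prop := out = getEndNS_alt st
instance (st : String) (out : Option Int) : Decidable (Spec_getEndNS st out) := by unfold Spec_getEndNS; infer_instance

-- ===== CLAIM (what is proved, stated in full; the proofs are below) =====
def Claim_equal_getEndNS : Prop := ∀ (st : String), Dom_getEndNS st → Spec_getEndNS st (getEndNS st)

-- ===== LEMMAS AND PROOFS =====

-- With only spaces/tabs before it, the first '<' of the whole string sits right after the prefix.
theorem find_lt_ws_prefix (pre rest : List Char)
    (h : ∀ c ∈ pre, c = ' ' ∨ c = '\t') :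
    PySem.Chars.find (pre ++ '<' :: rest) ['<'] = (pre.length : Int) := by
  set s := pre ++ '<' :: rest with hs
  have hinf : ['<'] <:+: s := ⟨pre, rest, by simp [hs]⟩
  have h0 : 0 ≤ PySem.Chars.find s ['<'] := (PySem.Chars.find_nonneg_iff _ _).mpr hinf
  obtain ⟨hpref, hmin⟩ := PySem.Chars.find_spec (s := s) (sub := ['<']) h0
  set n := (PySem.Chars.find s ['<']).toNat with hn
  have hval : ∀ i, ['<'] <+: s.drop i → s[i]? = some '<' := by
    intro i hi
    obtain ⟨t, ht⟩ := hi
    have : (s.drop i).head? = some '<' := by rw [← ht]; rfl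
    simpa [List.head?_drop] using this
  have hP : ['<'] <+: s.drop pre.length := by
    refine ⟨rest, ?_⟩
    simp [hs]
  have hnle : n ≤ pre.length := by
    by_contra hlt
    exact hmin pre.length (by omega) hP
  have hge : pre.length ≤ n := by
    by_contra hlt
    push Not at hlt
    have := hval n hpref
    have hg : s[n]? = pre[n]? := by
      rw [hs]; exact (List.getElem?_append_left (by omega))
    have hc : pre[n]? = some '<' := by rw [← hg, this]
    have hmem : '<' ∈ pre := by
      have hm : n < pre.length := hlt
      have : pre[n] = '<' := by
        have := hc; simpa [List.getElem?_eq_getElem hm] using this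
      exact this ▸ List.getElem_mem hm
    rcases h _ hmem with h1 | h1 <;> simp at h1
  have : n = pre.length := le_antisymm hnle hge
  omega

-- Loop invariant: with a spaces/tabs prefix already consumed, A's remaining loop
-- computes B's stripped-suffix case analysis.
theorem aux_eq (rest pre : List Char) (h : ∀ c ∈ pre, c = ' ' ∨ c = '\t')
    (st : String) (hst : st.toList = pre ++ rest) :
    getEndNSAux st rest =
      (let stripped := rest.dropWhile (fun c => c == ' ' || c == '\t')
       if stripped = [] then none
       else if stripped.head? = some '<' then some (((pre ++ rest).length : Int) - stripped.length)
       else some (-6)) := by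
  induction rest generalizing pre with
  | nil => simp [getEndNSAux]
  | cons c r ih =>
    by_cases hlt : c = '<'
    · subst hlt
      have hdw : ('<' :: r).dropWhile (fun c => c == ' ' || c == '\t') = '<' :: r := by
        simp [List.dropWhile]
      simp only [getEndNSAux, hdw]
      have hfind : PySem.Str.find st (String.ofList ['<']) = (pre.length : Int) := by
        have := find_lt_ws_prefix pre r h
        simp [PySem.Str.find_eq, hst, this]
      rw [hfind]
      simp
    · by_cases hws : c = ' ' ∨ c = '\t'
      · have hdw : (c :: r).dropWhile (fun c => c == ' ' || c == '\t')
            = r.dropWhile (fun c => c == ' ' || c == '\t') := by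
          rcases hws with h1 | h1 <;> simp [List.dropWhile, h1]
        have := ih (pre ++ [c]) (by intro x hx; rcases List.mem_append.mp hx with h1 | h1
                                    · exact h x h1
                                    · simp at h1; subst h1; exact hws)
                  (by simp [hst])
        simp only [getEndNSAux, if_neg hlt, parseNull, parseSpace, if_pos hws] at *
        simp only [hdw]
        simpa using this
      · have hdw : (c :: r).dropWhile (fun c => c == ' ' || c == '\t') = c :: r := by
          push Not at hws
          have hb : (c == ' ' || c == '\t') = false := by
            simp only [Bool.or_eq_false_iff, beq_eq_false_iff_ne, ne_eq]
            exact hws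
          rw [List.dropWhile_cons, hb]
          simp
        simp [getEndNSAux, hlt, parseNull, parseSpace, hws, hdw]

-- ===== VERDICT (by name: the statement is the Claim_ definition above) =====
theorem getEndNS_spec : Claim_equal_getEndNS := by
  intro st _
  unfold Spec_getEndNS getEndNS getEndNS_alt
  have := aux_eq st.toList [] (by simp) st (by simp)
  simpa using this
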